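-- pv_equiv track=rewrite | github.com/ldhbenecia/Algorithm | 프로그래머스/1/135808. 과일 장수/과일 장수.py | solution
-- ===== SOURCE A (Python) =====
-- def solution(k, m, score):
--     answer = 0
--     score.sort(reverse = True)
--     stack = []
--
--     for i in score:
--         if len(stack) < m:
--             stack.append(i)
--             if len(stack) == m:
--                 answer += min(stack) * m
--                 stack.clear()
--
--     return answer
-- ===== SOURCE B (Python) =====
-- def solution(k, m, score):
--     score.sort(reverse=True)
--     if m <= 0:
--         return 0
--     return sum(score[i] * m for i in range(m - 1, len(score), m))
-- ===== Notes on version B (the rewrite author's own statement) =====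
-- stated objective: simpler
-- what changed: Replaces A's stack-building loop (append until the box holds m fruits, add min(stack)*m, clear) by sorting descending and summing score[i]*m directly over the strided indices m-1, 2m-1, ..., since the minimum of each descending m-group is its last element.
import Mathlib
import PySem

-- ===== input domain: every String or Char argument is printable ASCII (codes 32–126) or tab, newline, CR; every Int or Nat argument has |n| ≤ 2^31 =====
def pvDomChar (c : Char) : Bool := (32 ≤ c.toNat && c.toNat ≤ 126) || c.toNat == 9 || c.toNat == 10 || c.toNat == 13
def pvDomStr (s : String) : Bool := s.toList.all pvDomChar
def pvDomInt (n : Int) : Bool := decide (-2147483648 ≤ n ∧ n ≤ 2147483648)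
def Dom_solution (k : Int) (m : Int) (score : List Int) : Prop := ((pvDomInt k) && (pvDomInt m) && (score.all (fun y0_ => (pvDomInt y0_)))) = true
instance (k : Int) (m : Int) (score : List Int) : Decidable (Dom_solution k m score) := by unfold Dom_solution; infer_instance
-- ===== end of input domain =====

-- B replaces A's stack/min accumulator loop by a direct strided sum over the
-- descending-sorted list (objective: simpler). Both A and B sort `score` in
-- place in Python; the equivalence proved here is about the return value.

-- ===== PORT A =====
-- the body of A's `for i in score:` loop; state = (answer, stack).
-- `min(stack)` is ported as `(min? stack).getD 0`: the branch only fires with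
-- `stack` nonempty (length = m ≥ 1), where min? is some, so the default is unreachable.
def pvStepA (m : Int) (st : Int × List Int) (i : Int) : Int × List Int :=
  if (st.2.length : Int) < m then
    if ((st.2 ++ [i]).length : Int) = m then
      (st.1 + ((PySem.List.min? (st.2 ++ [i]) (fun x => x)).getD 0) * m, [])
    else (st.1, st.2 ++ [i])
  else st

def solution (k : Int) (m : Int) (score : List Int) : Int :=
  let s := PySem.List.sorted score (fun x => x) true
  (s.foldl (pvStepA m) (0, [])).1

-- ===== PORT B =====
def solution_alt (k : Int) (m : Int) (score : List Int) : Int :=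
  let s := PySem.List.sorted score (fun x => x) true
  if m ≤ 0 then 0
  else (PySem.List.pyRange (m - 1) (s.length : Int) m).foldl
        (fun acc i => acc + PySem.List.pyGetD s i 0 * m) 0

-- ===== PRECONDITION & SPEC =====
def Spec_solution (k : Int) (m : Int) (score : List Int) (out : Int) : Prop := out = solution_alt k m score
instance (k : Int) (m : Int) (score : List Int) (out : Int) : Decidable (Spec_solution k m score out) := by unfold Spec_solution; infer_instance

-- ===== CLAIM (what is proved, stated in full; the proofs are below) =====
def Claim_equal_solution : Prop := ∀ (k : Int) (m : Int) (score : List Int), Dom_solution k m score → Spec_solution k m score (solution k m score)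

-- ===== LEMMAS AND PROOFS =====

theorem pv_stepA_shift (m ans : Int) (st : List Int) (i : Int) :
    pvStepA m (ans, st) i = (ans + (pvStepA m (0, st) i).1, (pvStepA m (0, st) i).2) := by
  unfold pvStepA; split_ifs <;> simp

theorem pv_foldA_shift (m : Int) (l : List Int) (ans : Int) (st : List Int) :
    l.foldl (pvStepA m) (ans, st) =
      ((l.foldl (pvStepA m) (0, st)).1 + ans, (l.foldl (pvStepA m) (0, st)).2) := by
  induction l generalizing ans st with
  | nil => simp
  | cons x t ih =>
    simp only [List.foldl_cons, pv_stepA_shift m ans st x]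
    rw [ih]
    conv_rhs => rw [pv_stepA_shift m 0 st x, ih]
    simp; ring


theorem pv_stepA_full (m ans : Int) (st : List Int) (i : Int)
    (h1 : (st.length : Int) < m) (h2 : ((st ++ [i]).length : Int) = m) :
    pvStepA m (ans, st) i = (ans + ((PySem.List.min? (st ++ [i]) (fun x => x)).getD 0) * m, []) := by
  unfold pvStepA; rw [if_pos h1, if_pos h2]

theorem pv_stepA_app (m ans : Int) (st : List Int) (i : Int)
    (h1 : (st.length : Int) < m) (h2 : ¬ ((st ++ [i]).length : Int) = m) :
    pvStepA m (ans, st) i = (ans, st ++ [i]) := by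
  unfold pvStepA; rw [if_pos h1, if_neg h2]

theorem pv_foldl_add_sum (l : List Int) (f : Int → Int) (init : Int) :
    l.foldl (fun acc i => acc + f i) init = init + (l.map f).sum := by
  induction l generalizing init with
  | nil => simp
  | cons x t ih => simp [List.foldl_cons, ih]; ring

theorem pv_foldA_fill (m : Int) (c st : List Int) (ans : Int) (hc : c ≠ [])
    (hlen : (st.length : Int) + (c.length : Int) = m) :
    c.foldl (pvStepA m) (ans, st) =
      (ans + ((PySem.List.min? (st ++ c) (fun x => x)).getD 0) * m, []) := by
  induction c generalizing st ans with
  | nil => exact absurd rfl hc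
  | cons x t ih =>
    simp only [List.foldl_cons]
    have hlt : (st.length : Int) < m := by simp at hlen ⊢; omega
    by_cases ht : t = []
    · subst ht
      have heq : ((st ++ [x]).length : Int) = m := by simp at hlen ⊢; omega
      rw [pv_stepA_full m ans st x hlt heq]
      simp
    · have h1 : 0 < t.length := List.length_pos_iff.mpr ht
      have hne : ¬ ((st ++ [x]).length : Int) = m := by simp at hlen ⊢; omega
      rw [pv_stepA_app m ans st x hlt hne]
      rw [ih (st ++ [x]) ans ht (by simp at hlen ⊢; omega)]
      simp

theorem pv_foldA_short (m : Int) (c st : List Int) (ans : Int)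
    (hlen : (st.length : Int) + (c.length : Int) < m) :
    c.foldl (pvStepA m) (ans, st) = (ans, st ++ c) := by
  induction c generalizing st with
  | nil => simp
  | cons x t ih =>
    simp only [List.foldl_cons]
    have hlt : (st.length : Int) < m := by simp at hlen ⊢; omega
    have hne : ¬ ((st ++ [x]).length : Int) = m := by simp at hlen ⊢; omega
    rw [pv_stepA_app m ans st x hlt hne]
    rw [ih (st ++ [x]) (by simp at hlen ⊢; omega)]
    simp

theorem pv_count_succ (d st : Int) (hst : 0 < st) (hd : 0 < d) :
    ((d + st - 1) / st).toNat = ((d - st + st - 1) / st).toNat + 1 := by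
  have h1 : d + st - 1 = (d - st + st - 1) + 1 * st := by ring
  rw [h1, Int.add_mul_ediv_right _ _ (by omega : st ≠ 0)]
  have h2 : 0 ≤ (d - st + st - 1) / st := by
    apply Int.ediv_nonneg <;> omega
  omega

theorem pv_pyRange_pos_nil (a b st : Int) (hst : 0 < st) (h : b ≤ a) :
    PySem.List.pyRange a b st = [] := by
  simp only [PySem.List.pyRange, if_neg (by omega : ¬ st = 0), if_pos hst,
    if_neg (by omega : ¬ a < b)]
  simp

theorem pv_pyRange_pos_cons (a b st : Int) (hst : 0 < st) (h : a < b) :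
    PySem.List.pyRange a b st = a :: PySem.List.pyRange (a + st) b st := by
  simp only [PySem.List.pyRange, if_neg (by omega : ¬ st = 0), if_pos hst, if_pos h]
  by_cases h2 : a + st < b
  · rw [if_pos h2]
    have : ((b - a + st - 1) / st).toNat = ((b - (a+st) + st - 1) / st).toNat + 1 := by
      have := pv_count_succ (b - a) st hst (by omega)
      have e : b - (a + st) = b - a - st := by ring
      rw [e]; convert this using 3 <;> ring
    rw [this, List.range_succ_eq_map]
    simp only [List.map_map, List.map_cons]
    congr 1
    · simp
    · apply List.map_congr_left
      intro k _
      simp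
      ring
  · rw [if_neg h2]
    have hb : b - a ≤ st := by omega
    have : ((b - a + st - 1) / st).toNat = 1 := by
      have e : b - a + st - 1 = (b - a - 1) + 1 * st := by ring
      rw [e, Int.add_mul_ediv_right _ _ (by omega : st ≠ 0)]
      rw [Int.ediv_eq_zero_of_lt (by omega) (by omega)]
      rfl
    rw [this]
    simp

theorem pv_pyRange_shift (a b st : Int) :
    PySem.List.pyRange (a + st) b st = (PySem.List.pyRange a (b - st) st).map (· + st) := by
  simp only [PySem.List.pyRange]
  by_cases h0 : st = 0
  · simp [h0]
  rw [if_neg h0, if_neg h0]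
  by_cases hp : 0 < st
  · rw [if_pos hp, if_pos hp]
    have he : (b - st - a + st - 1) = (b - (a + st) + st - 1) := by ring
    by_cases hlt : a + st < b
    · rw [if_pos hlt, if_pos (by omega : a < b - st), he, List.map_map]
      apply List.map_congr_left; intro k _; simp; ring
    · rw [if_neg hlt, if_neg (by omega : ¬ a < b - st)]
      simp
  · rw [if_neg hp, if_neg hp]
    have he : (a - (b - st) + -st - 1) = (a + st - b + -st - 1) := by ring
    by_cases hlt : b < a + st
    · rw [if_pos hlt, if_pos (by omega : b - st < a), he, List.map_map]
      apply List.map_congr_left; intro k _; simp; ring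
    · rw [if_neg hlt, if_neg (by omega : ¬ b - st < a)]
      simp

theorem pv_pyRange_lower (a b st x : Int) (hst : 0 < st) (hx : x ∈ PySem.List.pyRange a b st) :
    a ≤ x := by
  simp only [PySem.List.pyRange, if_neg (by omega : ¬ st = 0), if_pos hst] at hx
  rw [List.mem_map] at hx
  obtain ⟨k, _, rfl⟩ := hx
  have : 0 ≤ st * (k : Int) := by positivity
  omega

theorem pv_min_desc (c : List Int) (hc : c ≠ [])
    (hd : c.Pairwise (fun a b => b ≤ a)) :
    (PySem.List.min? c (fun x => x)).getD 0 = c.getLast hc := by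
  obtain ⟨v, hv⟩ : ∃ v, PySem.List.min? c (fun x => x) = some v := by
    cases h : PySem.List.min? c (fun x => x) with
    | none => exact absurd ((PySem.List.min?_eq_none_iff c _).mp h) hc
    | some v => exact ⟨v, rfl⟩
  rw [hv]; simp only [Option.getD_some]
  have hmem := PySem.List.min?_mem hv
  have hmin := PySem.List.min?_isMin hv
  have hlast_le : ∀ y ∈ c, c.getLast hc ≤ y := by
    intro y hy
    rcases (List.mem_iff_getElem).mp hy with ⟨j, hj, rfl⟩
    rw [List.getLast_eq_getElem]
    rcases Nat.lt_or_ge j (c.length - 1) with hlt | hge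
    · exact List.pairwise_iff_getElem.mp hd j (c.length - 1) hj (by omega) hlt
    · have hj' : j = c.length - 1 := by omega
      subst hj'; exact le_refl _
  exact le_antisymm (hmin _ (List.getLast_mem hc)) (hlast_le v hmem)

theorem pv_pyGetD_drop (s : List Int) (i m : Int) (hi : 0 ≤ i) (hm : 0 ≤ m) :
    PySem.List.pyGetD s (i + m) 0 = PySem.List.pyGetD (s.drop m.toNat) i 0 := by
  rw [PySem.List.pyGetD_of_nonneg _ _ (by omega), PySem.List.pyGetD_of_nonneg _ _ hi]
  have ht : (i + m).toNat = m.toNat + i.toNat := by omega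
  simp [List.getD, ht, List.getElem?_drop]

theorem pv_foldA_nonpos (m : Int) (hm : m ≤ 0) (l : List Int) :
    l.foldl (pvStepA m) (0, ([] : List Int)) = (0, []) := by
  induction l with
  | nil => rfl
  | cons x t ih =>
    have h : pvStepA m (0, ([] : List Int)) x = (0, []) := by
      unfold pvStepA; simp; omega
    simp [List.foldl_cons, h, ih]

-- B's strided sum, written as a function of the sorted list.
def pvB (m : Int) (s : List Int) : Int :=
  (PySem.List.pyRange (m - 1) (s.length : Int) m).foldl
    (fun acc i => acc + PySem.List.pyGetD s i 0 * m) 0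

theorem pv_B_nil (m : Int) (hm : 1 ≤ m) (s : List Int) (h : (s.length : Int) < m) :
    pvB m s = 0 := by
  unfold pvB
  rw [pv_pyRange_pos_nil _ _ _ (by omega) (by omega)]
  rfl

theorem pv_B_step (m : Int) (hm : 1 ≤ m) (s : List Int) (h : m ≤ (s.length : Int)) :
    pvB m s = s.getD (m.toNat - 1) 0 * m + pvB m (s.drop m.toNat) := by
  unfold pvB
  rw [pv_pyRange_pos_cons _ _ _ (by omega) (by omega)]
  rw [show m - 1 + m = (m - 1) + m from rfl, pv_pyRange_shift]
  rw [pv_foldl_add_sum, pv_foldl_add_sum]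
  have hlen : ((s.drop m.toNat).length : Int) = (s.length : Int) - m := by
    simp [List.length_drop]; omega
  rw [hlen]
  have hmap : (PySem.List.pyRange (m - 1) ((s.length : Int) - m) m).map
        ((fun i => PySem.List.pyGetD s i 0 * m) ∘ (· + m)) =
      (PySem.List.pyRange (m - 1) ((s.length : Int) - m) m).map
        (fun i => PySem.List.pyGetD (s.drop m.toNat) i 0 * m) := by
    apply List.map_congr_left
    intro i hi
    have hi0 : m - 1 ≤ i := pv_pyRange_lower _ _ _ _ (by omega) hi
    simp only [Function.comp]
    rw [pv_pyGetD_drop s i m (by omega) (by omega)]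
  rw [List.map_cons, List.map_map, hmap]
  have hget : PySem.List.pyGetD s (m - 1) 0 = s.getD (m.toNat - 1) 0 := by
    rw [PySem.List.pyGetD_of_nonneg _ _ (by omega)]
    congr 1
    omega
  simp [hget]

-- main lemma: on a descending list, A's fold equals B's strided sum.
theorem pv_main (m : Int) (hm : 1 ≤ m) (s : List Int)
    (hd : s.Pairwise (fun a b => b ≤ a)) :
    (s.foldl (pvStepA m) (0, [])).1 = pvB m s := by
  by_cases hlt : (s.length : Int) < m
  · rw [pv_foldA_short m s [] 0 (by simpa using hlt), pv_B_nil m hm s hlt]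
  · rw [Int.not_lt] at hlt
    have hm1 : 1 ≤ m.toNat := by omega
    have hms : m.toNat ≤ s.length := by omega
    set c := s.take m.toNat with hc
    set r := s.drop m.toNat with hr
    have hcr : s = c ++ r := (List.take_append_drop m.toNat s).symm
    have hclen : c.length = m.toNat := by simp [hc]; omega
    have hcne : c ≠ [] := by
      intro habs; rw [habs] at hclen; simp at hclen; omega
    have hrlen : r.length = s.length - m.toNat := by simp [hr]
    have hrlt : r.length < s.length := by omega
    conv_lhs => rw [hcr]
    rw [List.foldl_append]
    rw [pv_foldA_fill m c [] 0 hcne (by simp [hclen]; omega)]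
    simp only [List.nil_append]
    rw [pv_foldA_shift]
    have hdr : r.Pairwise (fun a b => b ≤ a) := hd.sublist (List.drop_sublist _ _)
    have hdc : c.Pairwise (fun a b => b ≤ a) := hd.sublist (List.take_sublist _ _)
    have ih := pv_main m hm r hdr
    rw [pv_B_step m hm s hlt, ← hr]
    rw [ih]
    have hmin : (PySem.List.min? c (fun x => x)).getD 0 = s.getD (m.toNat - 1) 0 := by
      rw [pv_min_desc c hcne hdc]
      have e1 : c.getLast hcne = c.getD (m.toNat - 1) 0 := by
        rw [List.getLast_eq_getElem, List.getD_eq_getElem c 0 (by omega)]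
        congr 1
        omega
      rw [e1]
      simp only [List.getD, hc]
      rw [List.getElem?_take_of_lt (by omega : m.toNat - 1 < m.toNat)]
    rw [hmin]
    ring
termination_by s.length
decreasing_by simpa [hr] using hrlt

-- ===== VERDICT (by name: the statement is the Claim_ definition above) =====
theorem solution_spec : Claim_equal_solution := by
  intro k m score _
  unfold Spec_solution solution solution_alt
  by_cases hm : m ≤ 0
  · simp only [hm, if_pos, pv_foldA_nonpos m hm]
  · rw [Int.not_le] at hm
    have hm1 : 1 ≤ m := hm
    simp only [if_neg (not_le.mpr hm)]
    exact pv_main m hm1 _ (PySem.List.sorted_pairwise_rev score (fun x => x))
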